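-- pv_equiv track=rewrite | github.com/Hmdgt2/tol | backup_biblioteca_original_20251018_133529/analise_padroes.py | cluster_by_diff
-- ===== SOURCE A (Python) =====
-- from typing import List, Tuple
--
-- def cluster_by_diff(lst: List[int], max_diff: int = 2) -> List[List[int]]:
--     """Agrupa números que estão próximos uns dos outros."""
--     clusters: List[List[int]] = []
--     sorted_lst = sorted(lst)
--     if not sorted_lst:
--         return []
--     cluster = [sorted_lst[0]]
--     for x in sorted_lst[1:]:
--         if x - cluster[-1] <= max_diff:
--             cluster.append(x)
--         else:
--             clusters.append(cluster)
--             cluster = [x]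
--     clusters.append(cluster)
--     return clusters
-- ===== SOURCE B (Python) =====
-- from typing import List
--
-- def cluster_by_diff(lst: List[int], max_diff: int = 2) -> List[List[int]]:
--     """Agrupa números que estão próximos uns dos outros."""
--     s = sorted(lst)
--     n = len(s)
--     if n == 0:
--         return []
--     # pass 1: boundary table — indices where a new cluster starts
--     breaks = [i + 1 for i, (a, b) in enumerate(zip(s, s[1:])) if b - a > max_diff]
--     # pass 2: slice between consecutive boundaries
--     bounds = [0] + breaks + [n]
--     return [s[a:b] for a, b in zip(bounds, bounds[1:])]
-- ===== Notes on version B (the rewrite author's own statement) =====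
-- stated objective: alternative
-- what changed: Instead of growing clusters incrementally in one fold with a current-cluster accumulator, B first computes the table of break indices (adjacent sorted pairs with gap > max_diff) and then slices the sorted list between consecutive boundaries.
import Mathlib
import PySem

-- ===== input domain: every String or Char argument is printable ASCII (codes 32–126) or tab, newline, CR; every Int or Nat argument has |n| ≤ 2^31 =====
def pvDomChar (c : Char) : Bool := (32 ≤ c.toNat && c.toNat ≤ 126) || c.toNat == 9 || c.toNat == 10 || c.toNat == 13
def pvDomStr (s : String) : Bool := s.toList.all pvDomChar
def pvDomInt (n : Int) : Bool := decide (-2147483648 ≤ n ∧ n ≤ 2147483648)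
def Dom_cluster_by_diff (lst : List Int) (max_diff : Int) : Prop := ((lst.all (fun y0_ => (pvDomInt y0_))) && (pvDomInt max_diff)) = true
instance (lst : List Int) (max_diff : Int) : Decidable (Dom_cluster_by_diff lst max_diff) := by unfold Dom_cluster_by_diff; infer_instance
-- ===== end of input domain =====

-- B replaces A's single fold that grows a current cluster by a boundary table
-- (break indices computed from adjacent sorted pairs) plus slicing; alternative
-- decomposition, same asymptotic cost.

-- ===== PORT A =====
-- literal port of A: sort, then one fold carrying (clusters, cluster).
-- cluster[-1] and sorted_lst[0] are always in range (the cluster list is never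
-- empty), so pyGetD's default 0 is never taken.
def cluster_by_diff (lst : List Int) (max_diff : Int) : List (List Int) :=
  let clusters : List (List Int) := []
  let sorted_lst := PySem.List.sorted lst (fun x => x) false
  if sorted_lst.isEmpty then [] else
    let cluster : List Int := [PySem.List.pyGetD sorted_lst 0 0]
    let st := (PySem.List.slice sorted_lst (some 1) none).foldl
      (fun (p : List (List Int) × List Int) x =>
        if x - PySem.List.pyGetD p.2 (-1) 0 ≤ max_diff then (p.1, p.2 ++ [x])
        else (p.1 ++ [p.2], [x]))
      (clusters, cluster)
    st.1 ++ [st.2]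

-- ===== PORT B =====
-- literal port of Source B: break-index table, then slices between consecutive bounds.
def cluster_by_diff_alt (lst : List Int) (max_diff : Int) : List (List Int) :=
  let s := PySem.List.sorted lst (fun x => x) false
  let n : Int := s.length
  if n == 0 then [] else
    let breaks : List Int :=
      ((PySem.List.enumerate (s.zip (PySem.List.slice s (some 1) none))).filter
        (fun p => p.2.2 - p.2.1 > max_diff)).map (fun p => p.1 + 1)
    let bounds : List Int := [0] ++ breaks ++ [n]
    (bounds.zip (PySem.List.slice bounds (some 1) none)).map
      (fun p => PySem.List.slice s (some p.1) (some p.2))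

-- ===== PRECONDITION & SPEC =====
def Spec_cluster_by_diff (lst : List Int) (max_diff : Int) (out : List (List Int)) : Prop := out = cluster_by_diff_alt lst max_diff
instance (lst : List Int) (max_diff : Int) (out : List (List Int)) : Decidable (Spec_cluster_by_diff lst max_diff out) := by unfold Spec_cluster_by_diff; infer_instance

-- ===== CLAIM (what is proved, stated in full; the proofs are below) =====
def Claim_equal_cluster_by_diff : Prop := ∀ (lst : List Int) (max_diff : Int), Dom_cluster_by_diff lst max_diff → Spec_cluster_by_diff lst max_diff (cluster_by_diff lst max_diff)

-- ===== LEMMAS AND PROOFS =====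

-- prepend p onto the first block (used to state the common shape of both ports)
def prependAll (p : List Int) : List (List Int) → List (List Int)
  | [] => [p]
  | h :: tl => (p ++ h) :: tl

theorem prependAll_comp (p q : List Int) (l : List (List Int)) :
    prependAll p (prependAll q l) = prependAll (p ++ q) l := by
  cases l <;> simp [prependAll]

-- canonical recursive clustering of a (sorted) list
def chunk (d : Int) : List Int → List (List Int)
  | [] => []
  | [x] => [[x]]
  | x :: y :: r => if y - x ≤ d then prependAll [x] (chunk d (y :: r))
                   else [x] :: chunk d (y :: r)

-- ---- A's fold equals chunk ----

def grow (d : Int) (cur : List Int) : List Int → List (List Int)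
  | [] => [cur]
  | x :: r => if x - PySem.List.pyGetD cur (-1) 0 ≤ d then grow d (cur ++ [x]) r
              else cur :: grow d [x] r

theorem foldA_eq_grow (d : Int) (l : List Int) : ∀ (cs : List (List Int)) (cur : List Int),
    (let st := l.foldl
      (fun (p : List (List Int) × List Int) x =>
        if x - PySem.List.pyGetD p.2 (-1) 0 ≤ d then (p.1, p.2 ++ [x])
        else (p.1 ++ [p.2], [x])) (cs, cur);
     st.1 ++ [st.2]) = cs ++ grow d cur l := by
  induction l with
  | nil => intro cs cur; simp [grow]
  | cons x r ih =>
    intro cs cur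
    simp only [List.foldl_cons, grow]
    split_ifs with h
    · exact ih cs (cur ++ [x])
    · have h2 := ih (cs ++ [cur]) [x]
      simp only [] at h2
      rw [h2, List.append_assoc, List.singleton_append]

theorem pyGetD_last_singleton (y d : Int) : PySem.List.pyGetD [y] (-1) d = y := by
  have := PySem.List.pyGetD_neg_one_append_singleton ([] : List Int) y d
  simpa using this

theorem grow_shift (d : Int) : ∀ (r p : List Int) (y : Int),
    grow d (p ++ [y]) r = prependAll p (grow d [y] r) := by
  intro r
  induction r with
  | nil => intro p y; simp [grow, prependAll]
  | cons x r' ih =>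
    intro p y
    have hl : PySem.List.pyGetD (p ++ [y]) (-1) 0 = y :=
      PySem.List.pyGetD_neg_one_append_singleton p y 0
    have hy : PySem.List.pyGetD [y] (-1) 0 = y := pyGetD_last_singleton y 0
    by_cases h : x - y ≤ d
    · have e1 : grow d (p ++ [y]) (x :: r') = grow d ((p ++ [y]) ++ [x]) r' := by
        simp [grow, hl, h]
      have e2 : grow d [y] (x :: r') = grow d ([y] ++ [x]) r' := by
        simp [grow, hy, h]
      rw [e1, e2, ih ((p ++ [y])) x, ih [y] x, prependAll_comp]
    · have e1 : grow d (p ++ [y]) (x :: r') = (p ++ [y]) :: grow d [x] r' := by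
        simp [grow, hl, h]
      have e2 : grow d [y] (x :: r') = [y] :: grow d [x] r' := by
        simp [grow, hy, h]
      rw [e1, e2]; rfl

theorem grow_eq_chunk (d : Int) : ∀ (t : List Int) (x : Int),
    grow d [x] t = chunk d (x :: t) := by
  intro t
  induction t with
  | nil => intro x; simp [grow, chunk]
  | cons y r ih =>
    intro x
    have hx : PySem.List.pyGetD [x] (-1) 0 = x := pyGetD_last_singleton x 0
    by_cases h : y - x ≤ d
    · have e1 : grow d [x] (y :: r) = grow d ([x] ++ [y]) r := by simp [grow, hx, h]
      rw [e1, grow_shift d r [x] y, ih y]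
      simp [chunk, h]
    · have e1 : grow d [x] (y :: r) = [x] :: grow d [y] r := by simp [grow, hx, h]
      rw [e1, ih y]
      simp [chunk, h]

-- ---- B's break table ----

def brk (d : Int) : List Int → List Int
  | [] => []
  | [_] => []
  | x :: y :: r => (if y - x > d then [1] else []) ++ (brk d (y :: r)).map (· + 1)

theorem brk_pos (d : Int) : ∀ (s : List Int), ∀ m ∈ brk d s, 1 ≤ m := by
  intro s
  induction s with
  | nil => simp [brk]
  | cons x t ih =>
    cases t with
    | nil => simp [brk]
    | cons y r =>
      intro m hm
      simp only [brk, List.mem_append, List.mem_map] at hm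
      rcases hm with hm | ⟨a, ha, rfl⟩
      · split at hm <;> simp_all
      · have := ih a ha; omega

theorem breaks_eq_brk (d : Int) : ∀ (s : List Int) (s0 : Int),
    ((PySem.List.enumerate (s.zip (s.tail)) s0).filter
        (fun p => p.2.2 - p.2.1 > d)).map (fun p => p.1 + 1)
      = (brk d s).map (· + s0) := by
  intro s
  induction s with
  | nil => intro s0; simp [brk]
  | cons x t ih =>
    cases t with
    | nil => intro s0; simp [brk]
    | cons y r =>
      intro s0
      have hz : ((x :: y :: r).zip ((x :: y :: r).tail)) = (x, y) :: ((y :: r).zip r) := by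
        simp
      rw [hz, PySem.List.enumerate_cons]
      have ht : ((y :: r).zip ((y :: r).tail)) = ((y :: r).zip r) := by simp
      have ih' := ih (s0 + 1)
      rw [ht] at ih'
      by_cases h : y - x > d
      · rw [List.filter_cons_of_pos (by simpa using h)]
        have hb2 : brk d (x :: y :: r) = 1 :: (brk d (y :: r)).map (· + 1) := by
          simp [brk, h]
        rw [hb2, List.map_cons, List.map_cons, ih', List.map_map]
        refine List.cons_eq_cons.mpr ⟨by show s0 + 1 = 1 + s0; ring,
          List.map_congr_left fun a _ => by simp only [Function.comp_apply]; ring⟩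
      · rw [List.filter_cons_of_neg (by simpa using h)]
        have hb2 : brk d (x :: y :: r) = (brk d (y :: r)).map (· + 1) := by
          simp [brk, h]
        rw [hb2, ih', List.map_map]
        exact List.map_congr_left fun a _ => by simp only [Function.comp_apply]; ring

-- ---- B's slicing equals chunk ----

def sl (s bounds : List Int) : List (List Int) :=
  (bounds.zip bounds.tail).map (fun p => PySem.List.slice s (some p.1) (some p.2))

theorem slice_cons_shift (x : Int) (t : List Int) (a b : Int) (ha : 0 ≤ a) (hb : 0 ≤ b) :
    PySem.List.slice (x :: t) (some (a + 1)) (some (b + 1)) = PySem.List.slice t (some a) (some b) := by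
  rw [PySem.List.slice_toNat _ (by omega) (by omega), PySem.List.slice_toNat _ ha hb]
  have h1 : (a + 1).toNat = a.toNat + 1 := by omega
  have h2 : (b + 1).toNat = b.toNat + 1 := by omega
  simp [h1, h2]

theorem slice_cons_zero (x : Int) (t : List Int) (b : Int) (hb : 0 ≤ b) :
    PySem.List.slice (x :: t) (some 0) (some (b + 1)) = x :: PySem.List.slice t (some 0) (some b) := by
  rw [PySem.List.slice_toNat _ (by omega) (by omega), PySem.List.slice_toNat _ (by omega) hb]
  have h2 : (b + 1).toNat = b.toNat + 1 := by omega
  simp [h2]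

theorem sl_cons (s : List Int) (a c : Int) (rest : List Int) :
    sl s (a :: c :: rest) = PySem.List.slice s (some a) (some c) :: sl s (c :: rest) := by
  simp [sl]

theorem sl_shift (x : Int) (t : List Int) : ∀ (M : List Int) (b : Int), 0 ≤ b → (∀ m ∈ M, 0 ≤ m) →
    sl (x :: t) ((b + 1) :: M.map (· + 1)) = sl t (b :: M) := by
  intro M
  induction M with
  | nil => intro b _ _; simp [sl]
  | cons m M' ih =>
    intro b hb hM
    have hm : 0 ≤ m := hM m (by simp)
    have hM' : ∀ a ∈ M', 0 ≤ a := fun a ha => hM a (by simp [ha])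
    simp only [List.map_cons]
    rw [sl_cons, sl_cons, slice_cons_shift x t b m hb hm, ih m hm hM']

theorem sl_eq_chunk (d : Int) : ∀ (s : List Int), s ≠ [] →
    sl s (0 :: (brk d s ++ [(s.length : Int)])) = chunk d s := by
  intro s
  induction s with
  | nil => intro h; exact absurd rfl h
  | cons x t ih =>
    intro _
    cases t with
    | nil => simp [brk, chunk, sl, PySem.List.slice_toNat]
    | cons y r =>
      have hne : (y :: r) ≠ [] := by simp
      have iht := ih hne
      -- the full boundary list of the tail, and its positivity
      set M : List Int := brk d (y :: r) ++ [((y :: r).length : Int)] with hMdef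
      have hMpos : ∀ m ∈ M, 0 ≤ m := by
        intro m hm
        rcases List.mem_append.mp hm with h1 | h1
        · have := brk_pos d (y :: r) m h1; omega
        · simp at h1; omega
      have hMne : M ≠ [] := by simp [hMdef]
      obtain ⟨m0, M1, hM0⟩ : ∃ m0 M1, M = m0 :: M1 := by
        cases hM : M with
        | nil => exact absurd hM hMne
        | cons a l => exact ⟨a, l, rfl⟩
      have hm0 : 0 ≤ m0 := hMpos m0 (by rw [hM0]; simp)
      have hM1 : ∀ a ∈ M1, 0 ≤ a := fun a ha => hMpos a (by rw [hM0]; simp [ha])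
      -- boundary list of x :: y :: r is 0 :: (prefix) ++ map (+1) M
      have hlen : (((x :: y :: r).length : Int)) = ((y :: r).length : Int) + 1 := by
        simp
      have hbrk : brk d (x :: y :: r) ++ [((x :: y :: r).length : Int)]
          = (if y - x > d then [(1 : Int)] else []) ++ M.map (· + 1) := by
        simp only [brk, hMdef, List.map_append, List.append_assoc, hlen]
        simp
      by_cases h : y - x ≤ d
      · have hgt : ¬ (y - x > d) := by omega
        rw [hbrk, if_neg hgt, List.nil_append]
        rw [hM0, List.map_cons]
        rw [sl_cons, slice_cons_zero x (y :: r) m0 hm0, sl_shift x (y :: r) M1 m0 hm0 hM1]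
        rw [hM0] at iht
        rw [sl_cons] at iht
        have hch : chunk d (x :: y :: r) = prependAll [x] (chunk d (y :: r)) := by
          simp [chunk, h]
        rw [hch, ← iht, prependAll]
        simp
      · have hgt : y - x > d := by omega
        rw [hbrk, if_pos hgt, List.singleton_append]
        have h01 : (0 : Int) :: (1 : Int) :: M.map (· + 1)
            = (0 : Int) :: ((0 : Int) + 1) :: M.map (· + 1) := by norm_num
        rw [sl_cons]
        have hs1 : PySem.List.slice (x :: y :: r) (some 0) (some 1) = [x] := by
          rw [PySem.List.slice_toNat _ (by omega) (by omega)]; simp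
        have h0 : ((1 : Int) :: M.map (· + 1)) = ((0 : Int) + 1) :: M.map (· + 1) := by norm_num
        rw [hs1, h0, sl_shift x (y :: r) M (0 : Int) (by omega) hMpos, iht]
        simp [chunk, h]

-- ---- assembling the two ports ----

theorem portA_eq_chunk (lst : List Int) (max_diff : Int) :
    cluster_by_diff lst max_diff = chunk max_diff (PySem.List.sorted lst (fun x => x) false) := by
  unfold cluster_by_diff
  cases hs : PySem.List.sorted lst (fun x => x) false with
  | nil => simp [chunk]
  | cons x t =>
    simp only [List.isEmpty_cons]
    rw [PySem.List.slice_from_one]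
    simp only [List.tail_cons]
    have h0 : PySem.List.pyGetD (x :: t) 0 0 = x := by
      simp [PySem.List.pyGetD_zero_cons]
    rw [h0, foldA_eq_grow max_diff t [] [x], grow_eq_chunk]
    simp

theorem portB_eq_chunk (lst : List Int) (max_diff : Int) :
    cluster_by_diff_alt lst max_diff = chunk max_diff (PySem.List.sorted lst (fun x => x) false) := by
  unfold cluster_by_diff_alt
  cases hs : PySem.List.sorted lst (fun x => x) false with
  | nil => simp [chunk]
  | cons x t =>
    have hne : (x :: t) ≠ [] := by simp
    have hn : ¬ (((x :: t).length : Int) == 0) = true := by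
      simp only [beq_iff_eq, List.length_cons]; push_cast; omega
    simp only [hn, if_neg, Bool.not_eq_true]
    rw [PySem.List.slice_from_one, PySem.List.slice_from_one]
    simp only [List.tail_cons]
    have hb := breaks_eq_brk max_diff (x :: t) 0
    simp only [List.tail_cons] at hb
    have hb' : ((PySem.List.enumerate ((x :: t).zip t) 0).filter
        (fun p => p.2.2 - p.2.1 > max_diff)).map (fun p => p.1 + 1) = brk max_diff (x :: t) := by
      rw [hb]; simp
    rw [hb']
    have hfin := sl_eq_chunk max_diff (x :: t) hne
    simpa [sl] using hfin

-- ===== VERDICT (by name: the statement is the Claim_ definition above) =====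
theorem cluster_by_diff_spec : Claim_equal_cluster_by_diff := by
  intro lst max_diff _
  unfold Spec_cluster_by_diff
  rw [portA_eq_chunk, portB_eq_chunk]
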